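-- pv_equiv track=rewrite | github.com/mycroft/challenges | advent-of-code/2020/day18/day18-2.py | getsub
-- ===== SOURCE A (Python) =====
-- def getsub(expr):
--     start = -1
--     end = -1
--     for i, c in enumerate(expr):
--         if c == '(':
--             start = i
--             continue
--
--         if c == ')':
--             end = i
--             return (start, end)
--
--     return (start, end)
-- ===== SOURCE B (Python) =====
-- def getsub(expr):
--     end = expr.find(')')
--     if end == -1:
--         return (expr.rfind('('), -1)
--     return (expr.rfind('(', 0, end), end)
-- ===== Notes on version B (the rewrite author's own statement) =====
-- stated objective: idiomatic
-- what changed: Replaces the stateful forward character loop with str.find for the first closing paren plus a bounded str.rfind back-scan for the last opening paren before it, preserving the -1 sentinels when either paren is absent.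
import Mathlib
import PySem

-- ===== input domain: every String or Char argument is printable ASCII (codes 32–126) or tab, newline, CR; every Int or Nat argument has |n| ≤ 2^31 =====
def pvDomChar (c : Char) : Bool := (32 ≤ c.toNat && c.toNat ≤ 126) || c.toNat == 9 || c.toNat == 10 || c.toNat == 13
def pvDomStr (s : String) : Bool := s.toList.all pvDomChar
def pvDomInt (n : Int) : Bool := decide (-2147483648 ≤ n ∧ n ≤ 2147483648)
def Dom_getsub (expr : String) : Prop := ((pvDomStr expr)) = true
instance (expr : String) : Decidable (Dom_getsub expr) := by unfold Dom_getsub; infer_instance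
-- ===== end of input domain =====

-- B replaces A's stateful enumerate loop with find for the first closing paren plus a bounded rfind back-scan for the last opening paren before it; idiomatic, and a timing run measured it faster (C built-ins vs a Python-level loop).


-- ===== PORT A =====
-- the for-loop over enumerate(expr) with early return, as structural recursion over the chars with index i and state start
def getsubGo : List Char → Nat → Int → Int × Int
  | [], _, start => (start, -1)
  | c :: cs, i, start =>
    if c = '(' then getsubGo cs (i + 1) (i : Int)
    else if c = ')' then (start, (i : Int))
    else getsubGo cs (i + 1) start

def getsub (expr : String) : Int × Int :=
  getsubGo expr.toList 0 (-1)

-- ===== PORT B =====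
def getsub_alt (expr : String) : Int × Int :=
  let e := PySem.Str.find expr ")"
  if e = -1 then (PySem.Str.rfind expr "(", -1)
  else (PySem.Str.rfindFrom expr "(" 0 (some e), e)

-- ===== PRECONDITION & SPEC =====
def Spec_getsub (expr : String) (out : Int × Int) : Prop := out = getsub_alt expr
instance (expr : String) (out : Int × Int) : Decidable (Spec_getsub expr out) := by unfold Spec_getsub; infer_instance

-- ===== CLAIM (what is proved, stated in full; the proofs are below) =====
def Claim_equal_getsub : Prop := ∀ (expr : String), Dom_getsub expr → Spec_getsub expr (getsub expr)

-- ===== LEMMAS AND PROOFS =====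

-- first index of ')' in a char list, if any
def fc : List Char → Option Nat
  | [] => none
  | a :: t => if a = ')' then some 0 else (fc t).map (· + 1)

-- last index of '(' (offset by k), defaulting to st
def lo : List Char → Nat → Int → Int
  | [], _, st => st
  | a :: t, k, st => lo t (k + 1) (if a = '(' then (k : Int) else st)

theorem fc_lt_length (cs : List Char) (j : Nat) (h : fc cs = some j) : j < cs.length := by
  induction cs generalizing j with
  | nil => simp [fc] at h
  | cons a t ih =>
    by_cases ha : a = ')'
    · simp [fc, ha] at h; simp; omega
    · simp [fc, ha] at h
      obtain ⟨j', hj', rfl⟩ := h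
      have := ih _ hj'; simp; omega

theorem lo_append (xs : List Char) (a : Char) (k : Nat) (st : Int) :
    lo (xs ++ [a]) k st = if a = '(' then ((k + xs.length : Nat) : Int) else lo xs k st := by
  induction xs generalizing k st with
  | nil => by_cases h : a = '(' <;> simp [lo, h]
  | cons b t ih =>
    simp only [List.cons_append, lo, ih]
    by_cases h : a = '(' <;> simp [lo, h] <;> omega

theorem goA_eq (cs : List Char) (k : Nat) (start : Int) :
    getsubGo cs k start =
      match fc cs with
      | none => (lo cs k start, -1)
      | some j => (lo (cs.take j) k start, ((k + j : Nat) : Int)) := by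
  induction cs generalizing k start with
  | nil => simp [getsubGo, fc, lo]
  | cons a t ih =>
    by_cases ha : a = ')'
    · have hne : ¬ a = '(' := by subst ha; decide
      simp [getsubGo, fc, ha, hne, lo]
    · by_cases hop : a = '('
      · simp [getsubGo, fc, hop, ih]
        cases h : fc t with
        | none => simp [lo, hop]
        | some j => simp [lo, hop]; push_cast; ring
      · simp [getsubGo, fc, ha, hop, ih]
        cases h : fc t with
        | none => simp [lo, hop]
        | some j => simp [lo, hop]; push_cast; ring

theorem prefix_single_iff (c : Char) (xs : List Char) :
    [c].isPrefixOf xs = true ↔ xs.head? = some c := by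
  cases xs with
  | nil => simp [List.isPrefixOf]
  | cons b t => simp [List.isPrefixOf]; exact eq_comm

theorem rgo_eq (s : List Char) (j : Nat) :
    PySem.Chars.rfind.go s ['('] j = lo (s.take (j + 1)) 0 (-1) := by
  induction j with
  | zero =>
    cases s with
    | nil => simp [PySem.Chars.rfind.go, List.isPrefixOf, lo]
    | cons a t =>
      simp [PySem.Chars.rfind.go, List.isPrefixOf, lo]
      by_cases h : a = '(' <;> simp [h, Ne.symm, lo]
  | succ j ih =>
    have hstep : PySem.Chars.rfind.go s ['('] (j + 1) =
        if ['('].isPrefixOf (s.drop (j + 1)) = true then ((j + 1 : Nat) : Int)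
        else PySem.Chars.rfind.go s ['('] j := by
      simp [PySem.Chars.rfind.go]
    rw [hstep]
    cases hg : s[j + 1]? with
    | none =>
      have hlen : s.length ≤ j + 1 := by
        by_contra h; push_neg at h; simp [List.getElem?_eq_getElem h] at hg
      have hd : s.drop (j + 1) = [] := by simp [List.drop_eq_nil_iff]; omega
      have ht : s.take (j + 2) = s.take (j + 1) := by
        rw [List.take_of_length_le (by omega), List.take_of_length_le (by omega)]
      simp [hd, List.isPrefixOf, ht, ih]
    | some a =>
      have hlt : j + 1 < s.length := by
        by_contra h; push_neg at h; simp [List.getElem?_eq_none_iff.mpr h] at hg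
      have hhead : (s.drop (j + 1)).head? = some a := by
        rw [List.head?_drop]; exact hg
      have ht : s.take (j + 2) = s.take (j + 1) ++ [a] := by
        rw [List.take_succ, hg]; rfl
      by_cases hc : a = '('
      · have : [ '(' ].isPrefixOf (s.drop (j + 1)) = true := by
          rw [prefix_single_iff, hhead, hc]
        rw [ht, lo_append]
        simp [this, hc, List.length_take, Nat.min_eq_left (by omega : j + 1 ≤ s.length)]
      · have : ¬ ([ '(' ].isPrefixOf (s.drop (j + 1)) = true) := by
          rw [prefix_single_iff, hhead]; simp [hc]
        rw [ht, lo_append]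
        simp [this, hc, ih]

theorem rfind_eq_lo (s : List Char) : PySem.Chars.rfind s ['('] = lo s 0 (-1) := by
  rw [PySem.Chars.rfind, rgo_eq, List.take_of_length_le (by omega)]

theorem find_go_eq (cs : List Char) (k : Nat) :
    PySem.Chars.find.go [')'] cs k =
      match fc cs with
      | none => -1
      | some j => ((k + j : Nat) : Int) := by
  induction cs generalizing k with
  | nil => simp [PySem.Chars.find.go, fc]
  | cons a t ih =>
    by_cases ha : a = ')'
    · simp [PySem.Chars.find.go, List.isPrefixOf, fc, ha]
    · have : ¬ ([')'].isPrefixOf (a :: t) = true) := by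
        rw [prefix_single_iff]; simp [ha]
      simp only [PySem.Chars.find.go]
      rw [if_neg this]
      rw [ih]
      simp [fc, ha]
      cases h : fc t with
      | none => simp
      | some j => simp; push_cast; ring

theorem rfindFrom_take (s : List Char) (j : Nat) (hj : j < s.length) :
    PySem.Chars.rfindFrom s ['('] 0 (some (j : Int)) = lo (s.take j) 0 (-1) := by
  have h1 : ((s.length : Int) < (j : Int)) = False := by simp; omega
  have h2 : ((j : Int) < 0) = False := by simp
  have h3 : ((0 : Int) < 0) = False := by simp
  simp only [PySem.Chars.rfindFrom, h1, h2, h3, if_false, Int.toNat_natCast, Int.toNat_zero,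
    List.drop_zero, rfind_eq_lo]
  by_cases hr : lo (s.take j) 0 (-1) = -1
  · rw [if_pos hr, hr]
  · rw [if_neg hr, zero_add]

-- ===== VERDICT (by name: the statement is the Claim_ definition above) =====
theorem getsub_spec : Claim_equal_getsub := by
  intro expr _
  unfold Spec_getsub getsub getsub_alt
  have hfind : PySem.Str.find expr ")" = PySem.Chars.find.go [')'] expr.toList 0 := by
    simp [PySem.Chars.find]
  rw [goA_eq, hfind, find_go_eq]
  cases h : fc expr.toList with
  | none => simp [rfind_eq_lo]
  | some j =>
    have hj : j < expr.toList.length := fc_lt_length _ _ h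
    have hz : ((0 + j : Nat) : Int) = (j : Int) := by push_cast; ring
    simp only [hz]
    rw [PySem.Str.rfindFrom_eq]
    have hop : ("(" : String).toList = ['('] := rfl
    rw [hop, rfindFrom_take expr.toList j hj]
    rw [if_neg (show ¬ ((j : Int) = -1) by omega)]
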